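-- pv_equiv track=rewrite | github.com/pypi-data/pypi-mirror-403 | packages/biomechzoo/biomechzoo-0.7.3.tar.gz/biomechzoo-0.7.3/src/biomechzoo/utils/common_substring.py | common_substring_join
-- ===== SOURCE A (Python) =====
-- def common_substring_join(strings):
--     # Split each string into parts
--     split_lists = [s.split('_') for s in strings]
--
--     # Transpose so we compare column-wise
--     common_parts = []
--     for parts in zip(*split_lists):
--         if len(set(parts)) == 1:   # All strings share this part
--             common_parts.append(parts[0])
--         else:
--             # As soon as one position differs, skip but keep checking further ones
--             continue
--
--     return "_".join(common_parts)
-- ===== SOURCE B (Python) =====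
-- def common_substring_join(strings):
--     if not strings:
--         return ""
--     parts0 = strings[0].split('_')
--     common = list(range(len(parts0)))
--     for s in strings[1:]:
--         ps = s.split('_')
--         common = [i for i in common if i < len(ps) and ps[i] == parts0[i]]
--     return "_".join(parts0[i] for i in common)
-- ===== Notes on version B (the rewrite author's own statement) =====
-- stated objective: alternative
-- what changed: A transposes the split lists with zip(*...) and keeps columns whose value set has size 1; B never transposes: it scans string by string, narrowing a list of still-common part indices of the first string's split, then joins the surviving parts.
import Mathlib
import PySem

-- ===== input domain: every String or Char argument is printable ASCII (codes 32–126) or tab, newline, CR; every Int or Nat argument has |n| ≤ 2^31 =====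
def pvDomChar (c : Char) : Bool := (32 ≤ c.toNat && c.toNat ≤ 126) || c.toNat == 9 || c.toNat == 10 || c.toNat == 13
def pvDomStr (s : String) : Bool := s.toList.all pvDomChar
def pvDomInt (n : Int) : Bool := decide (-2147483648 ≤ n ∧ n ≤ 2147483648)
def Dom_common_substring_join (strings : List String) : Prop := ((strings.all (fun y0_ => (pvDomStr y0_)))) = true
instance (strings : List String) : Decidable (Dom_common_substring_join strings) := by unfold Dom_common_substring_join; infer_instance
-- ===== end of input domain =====

-- B replaces A's transpose-then-compare-columns pass by a string-by-string scan that narrows a list of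
-- still-common part indices (objective: alternative decomposition, same asymptotic cost).

-- s.split('_'): the separator is the nonempty literal "_", so PySem.Str.split? is always `some`
def pySplitU (s : String) : List String := (PySem.Str.split? s "_").getD [""]

-- ===== PORT A =====
-- zip(*split_lists): take one element from the head of every list while all are nonempty
def pyZipStar (ls : List (List String)) : List (List String) :=
  match ls with
  | [] => []
  | l :: r =>
    if h : (l :: r).all (fun x => !x.isEmpty) then
      ((l :: r).map (fun x => x.headD "")) :: pyZipStar ((l :: r).map List.tail)
    else []
termination_by (ls.headD []).length
decreasing_by
  simp only [List.all_cons, Bool.and_eq_true, List.all_eq_true] at h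
  simp only [List.map_cons, List.headD_cons, List.length_tail]
  have : ¬ l.isEmpty := by simpa using h.1
  have : l ≠ [] := by simpa [List.isEmpty_iff] using this
  have : 0 < l.length := List.length_pos_of_ne_nil this
  omega

def common_substring_join (strings : List String) : String :=
  let split_lists := strings.map pySplitU
  let common_parts := (pyZipStar split_lists).foldl
    (fun acc parts =>
      if PySem.Set.len (PySem.Set.ofList parts) == 1 then
        acc ++ [parts.headD ""]   -- parts[0]; every column produced by zip is nonempty
      else acc) []
  PySem.Str.join "_" common_parts

-- ===== PORT B =====
def common_substring_join_alt (strings : List String) : String :=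
  match strings with
  | [] => ""
  | s0 :: rest =>
    let parts0 := pySplitU s0
    let common := rest.foldl
      (fun com s =>
        let ps := pySplitU s
        com.filter (fun i => decide (i < ps.length) && (ps.getD i "" == parts0.getD i "")))
      (List.range parts0.length)
    PySem.Str.join "_" (common.map (fun i => parts0.getD i ""))

-- ===== PRECONDITION & SPEC =====
def Spec_common_substring_join (strings : List String) (out : String) : Prop := out = common_substring_join_alt strings
instance (strings : List String) (out : String) : Decidable (Spec_common_substring_join strings out) := by unfold Spec_common_substring_join; infer_instance

-- ===== CLAIM (what is proved, stated in full; the proofs are below) =====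
def Claim_equal_common_substring_join : Prop := ∀ (strings : List String), Dom_common_substring_join strings → Spec_common_substring_join strings (common_substring_join strings)

-- ===== LEMMAS AND PROOFS =====

-- length of the shortest list (the number of columns zip produces); 0 for []
def minLen : List (List String) → Nat
  | [] => 0
  | [l] => l.length
  | l :: r :: rs => min l.length (minLen (r :: rs))

-- column k of the transpose, read with getD
def colAt (ls : List (List String)) (k : Nat) : List String := ls.map (fun x => x.getD k "")

lemma lt_minLen (k : Nat) : ∀ (l : List String) (r : List (List String)),
    (k < minLen (l :: r) ↔ k < l.length ∧ ∀ x ∈ r, k < x.length) := by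
  intro l r
  induction r generalizing l with
  | nil => simp [minLen]
  | cons x xs ih =>
    rw [show minLen (l :: x :: xs) = min l.length (minLen (x :: xs)) from rfl, lt_min_iff, ih x]
    constructor
    · rintro ⟨h1, hx, hxs⟩
      exact ⟨h1, fun y hy => by rcases List.mem_cons.mp hy with rfl | hy; exacts [hx, hxs y hy]⟩
    · rintro ⟨h1, h2⟩
      exact ⟨h1, h2 x (by simp), fun y hy => h2 y (by simp [hy])⟩

lemma minLen_map_tail : ∀ (l : List String) (r : List (List String)),
    (∀ x ∈ l :: r, x ≠ []) → minLen ((l :: r).map List.tail) + 1 = minLen (l :: r) := by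
  intro l r
  induction r generalizing l with
  | nil =>
    intro h
    have hl : l ≠ [] := h l (List.mem_cons_self ..)
    have : 0 < l.length := List.length_pos_of_ne_nil hl
    simp [minLen, List.length_tail]; omega
  | cons x xs ih =>
    intro h
    have hl : l ≠ [] := h l (List.mem_cons_self ..)
    have hlen : 0 < l.length := List.length_pos_of_ne_nil hl
    have hx : 0 < x.length := List.length_pos_of_ne_nil (h x (by simp))
    have := ih x (fun y hy => h y (by simpa using Or.inr (by simpa using hy)))
    simp only [List.map_cons, minLen, List.length_tail] at *
    omega

lemma colAt_map_tail (ls : List (List String)) (k : Nat) :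
    colAt (ls.map List.tail) k = colAt ls (k + 1) := by
  simp [colAt, List.map_map, Function.comp]

lemma pyZipStar_eq (ls : List (List String)) (h : ls ≠ []) :
    pyZipStar ls = (List.range (minLen ls)).map (colAt ls) := by
  induction ls using pyZipStar.induct with
  | case1 => exact absurd rfl h
  | case2 l r hall ih =>
    rw [pyZipStar, dif_pos hall]
    have hne : ∀ x ∈ l :: r, x ≠ [] := by
      intro x hx
      have := List.all_eq_true.mp hall x hx
      simpa [List.isEmpty_iff] using this
    have hm := minLen_map_tail l r hne
    rw [ih (by simp)]
    rw [← hm, List.range_succ_eq_map, List.map_cons]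
    congr 1
    · simp only [colAt, List.map_cons]
      congr 1
      · cases l <;> simp
      · apply List.map_congr_left
        intro x _
        cases x <;> simp
    · rw [List.map_map]
      apply List.map_congr_left
      intro k _
      simpa [Function.comp, Nat.succ_eq_add_one] using (colAt_map_tail (l :: r) k)
  | case3 l r hall =>
    rw [pyZipStar, dif_neg hall]
    have : ¬ (0 < minLen (l :: r)) := by
      rw [lt_minLen]
      intro ⟨h1, h2⟩
      apply hall
      rw [List.all_eq_true]
      intro x hx
      rcases List.mem_cons.mp hx with rfl | hx
      · simpa [List.isEmpty_iff, ← List.length_pos_iff] using h1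
      · simpa [List.isEmpty_iff, ← List.length_pos_iff] using h2 x hx
    have : minLen (l :: r) = 0 := by omega
    simp [this]

lemma setLen_one (a : String) (xs : List String) :
    (PySem.Set.len (PySem.Set.ofList (a :: xs)) == 1) = xs.all (· == a) := by
  rw [PySem.Set.ofList_cons]
  have hd : (PySem.Set.ofList xs).discard a = (PySem.Set.ofList xs).filter (fun y => !y == a) := rfl
  rcases h : (PySem.Set.ofList xs).filter (fun y => !y == a) with _ | ⟨b, bs⟩
  · have hall : xs.all (· == a) = true := by
      rw [List.all_eq_true]
      intro y hy
      have := List.filter_eq_nil_iff.mp h y (by rw [PySem.Set.mem_ofList]; exact hy)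
      simpa using this
    rw [hall, hd, h]
    simp [PySem.Set.len]
  · have hb : b ∈ (PySem.Set.ofList xs).filter (fun y => !y == a) := by rw [h]; simp
    rw [List.mem_filter, PySem.Set.mem_ofList] at hb
    have hall : xs.all (· == a) = false := by
      rw [List.all_eq_false]
      exact ⟨b, hb.1, by simpa using hb.2⟩
    rw [hall, hd, h, beq_eq_false_iff_ne]
    simp only [PySem.Set.len, List.length_cons]
    intro hc
    have : bs.length + 1 + 1 = 1 := by exact_mod_cast hc
    omega

lemma foldl_filter {α β : Type} (p : β → α → Bool) (xs : List β) (c0 : List α) :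
    xs.foldl (fun c s => c.filter (p s)) c0 = c0.filter (fun i => xs.all (fun s => p s i)) := by
  induction xs generalizing c0 with
  | nil => simp
  | cons x xs ih =>
    rw [List.foldl_cons, ih, List.filter_filter]
    apply List.filter_congr
    intro i _
    simp [Bool.and_comm]

-- the common index set, as both programs compute it
lemma list_eq (l0 : List String) (rs : List (List String)) :
    List.map (fun parts => List.headD parts "")
      (List.filter (fun parts => PySem.Set.len (PySem.Set.ofList parts) == 1)
        (List.map (colAt (l0 :: rs)) (List.range (minLen (l0 :: rs))))) =
    List.map (fun i => l0.getD i "")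
      (List.filter
        (fun i => rs.all (fun ps => decide (i < ps.length) && (ps.getD i "" == l0.getD i "")))
        (List.range l0.length)) := by
  rw [List.filter_map, List.map_map]
  have hcol : ∀ k, colAt (l0 :: rs) k = l0.getD k "" :: rs.map (fun x => x.getD k "") := by
    intro k; simp [colAt]
  have hm_le : minLen (l0 :: rs) ≤ l0.length := by
    by_contra hlt
    rw [Nat.not_le] at hlt
    have := (lt_minLen l0.length l0 rs).mp hlt
    omega
  obtain ⟨d, hd⟩ : ∃ d, l0.length = minLen (l0 :: rs) + d := ⟨_, (Nat.add_sub_cancel' hm_le).symm⟩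
  rw [hd, List.range_add, List.filter_append]
  have htail : List.filter
      (fun i => rs.all (fun ps => decide (i < ps.length) && (ps.getD i "" == l0.getD i "")))
      ((List.range d).map (fun x => minLen (l0 :: rs) + x)) = [] := by
    rw [List.filter_eq_nil_iff]
    intro i hi
    rw [List.mem_map] at hi
    obtain ⟨x, hx, rfl⟩ := hi
    rw [List.mem_range] at hx
    intro habs
    rw [List.all_eq_true] at habs
    have hlen : ∀ y ∈ rs, minLen (l0 :: rs) + x < y.length := by
      intro y hy
      have := habs y hy
      simp only [Bool.and_eq_true, decide_eq_true_eq] at this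
      exact this.1
    have : minLen (l0 :: rs) + x < minLen (l0 :: rs) := by
      rw [lt_minLen]
      exact ⟨by omega, hlen⟩
    omega
  rw [htail, List.append_nil]
  have hfil : List.filter (fun k => PySem.Set.len (PySem.Set.ofList (colAt (l0 :: rs) k)) == 1)
      (List.range (minLen (l0 :: rs))) =
      List.filter
        (fun i => rs.all (fun ps => decide (i < ps.length) && (ps.getD i "" == l0.getD i "")))
        (List.range (minLen (l0 :: rs))) := by
    apply List.filter_congr
    intro k hk
    rw [List.mem_range] at hk
    rw [hcol, setLen_one, List.all_map]
    rw [Bool.eq_iff_iff]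
    simp only [List.all_eq_true]
    constructor
    · intro hall ps hps
      have hklt : k < ps.length := ((lt_minLen k l0 rs).mp hk).2 ps hps
      have h2 := hall ps hps
      simp only [Function.comp, beq_iff_eq] at h2
      simp only [List.getD_eq_getElem?_getD, List.getElem?_eq_getElem hklt] at h2
      simp [hklt, List.getD_eq_getElem?_getD, h2]
    · intro hall ps hps
      have := hall ps hps
      simp only [Bool.and_eq_true] at this
      simpa using this.2
  have hfun : (fun k => List.headD (colAt (l0 :: rs) k) "") = (fun k => l0.getD k "") := by
    funext k
    rw [hcol]
    simp
  calc List.map ((fun parts => List.headD parts "") ∘ colAt (l0 :: rs))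
        (List.filter ((fun parts => PySem.Set.len (PySem.Set.ofList parts) == 1) ∘ colAt (l0 :: rs))
          (List.range (minLen (l0 :: rs))))
      = List.map (fun k => List.headD (colAt (l0 :: rs) k) "")
          (List.filter (fun k => PySem.Set.len (PySem.Set.ofList (colAt (l0 :: rs) k)) == 1)
            (List.range (minLen (l0 :: rs)))) := rfl
    _ = _ := by rw [hfil, hfun]

-- ===== VERDICT (by name: the statement is the Claim_ definition above) =====
theorem common_substring_join_spec : Claim_equal_common_substring_join := by
  intro strings _
  cases strings with
  | nil =>
    unfold Spec_common_substring_join common_substring_join common_substring_join_alt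
    simp only [List.map_nil]
    rw [show pyZipStar [] = [] from by rw [pyZipStar]]
    rfl
  | cons s0 rest =>
    unfold Spec_common_substring_join common_substring_join common_substring_join_alt
    simp only [List.map_cons]
    rw [pyZipStar_eq _ (by simp), PySem.List.foldl_append_if, List.nil_append,
        foldl_filter (fun s i =>
          decide (i < (pySplitU s).length) && ((pySplitU s).getD i "" == (pySplitU s0).getD i "")),
        list_eq (pySplitU s0) (rest.map pySplitU)]
    congr 2
    apply List.filter_congr
    intro i _
    rw [List.all_map]
    rfl
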